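-- pv_equiv track=rewrite | github.com/avihay30/PythonProjects | Python_practices/HW_Malam/HW02/q2.py | left_circular_shift
-- ===== SOURCE A (Python) =====
-- def deleting_leftest_number(number):
--     """ Function deleting_leftest_number gets a number
--         and return a string of that number without the leftest digit.
--     """
--     return str(number)[1:]
--
-- def get_leftest_digit(number):
--     """ Function get_leftest_digit gets a number
--         and return the leftest digit of that number.
--     """
--     return int(str(number)[0])
--
-- def concatenate_unit_digit_to_number(number, digit):
--     """ Function concatenate_unit_digit_to_number gets a number and a digit
--         and return a the number with the digit in its units.
--     """
--     return int(str(number) + str(digit))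
--
-- def left_circular_shift(list):
--     """ Function left_circular_shift gets a list of integers
--         and returns a left circular shift list.
--     """
--     # declaring an empty list, that will contain the shifted list.
--     shifted_list = []
--     # declaring a variable named "leftest_of_first_element"
--     # that will contain the leftest digit of the element in index 0 in the list.
--     leftest_of_first_element = 0
--     # running in a loop length of "list" times.
--     for i in range(len(list)):
--         # calculating and saving in a variable the leftest digit of the list[i].
--         leftest_digit = get_leftest_digit(list[i])
--         # if its the first iteration.
--         if i == 0:
--             # saving the leftest digit of the first number for later on.
--             leftest_of_first_element = leftest_digit
--         else:
--             # changing the element in place of i - 1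
--             # in the list to be
--             # shifted(leftest of list[i] to be digits of list[i-1]),
--             # by calling the function "concatenate_unit_digit_to_number".
--             shifted_list[i - 1] = concatenate_unit_digit_to_number(
--                 shifted_list[i - 1], leftest_digit)
--         # deleting the leftest digit in the number list[i]
--         # in order to complete the left circular shift of that cell in the list.
--         shifted_element = deleting_leftest_number(list[i])
--         # appending to the list the complete shifted element.
--         shifted_list.append(shifted_element)
--     # dealing with the first cell that needs to add
--     # its leftest digit to the last cell to his units.
--     shifted_list[-1] = concatenate_unit_digit_to_number(
--         shifted_list[-1], leftest_of_first_element)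
--
--     # returning the complete shifted_list.
--     return shifted_list
-- ===== SOURCE B (Python) =====
-- def left_circular_shift(list):
--     """Left circular digit shift: one indexed pass where element i drops its
--     leftmost digit and pulls the leftmost digit of its (cyclic) successor."""
--     n = len(list)
--     return [int(str(list[i])[1:] + str(int(str(list[(i + 1) % n])[0])))
--             for i in range(n)]
-- ===== Notes on version B (the rewrite author's own statement) =====
-- stated objective: simpler
-- what changed: Replaces the in-place backward mutation loop (i==0 branch, set shifted_list[i-1], post-loop shifted_list[-1] wrap fixup) with a single forward comprehension in which element i pulls the leftmost digit of list[(i+1) % n].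
import Mathlib
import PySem

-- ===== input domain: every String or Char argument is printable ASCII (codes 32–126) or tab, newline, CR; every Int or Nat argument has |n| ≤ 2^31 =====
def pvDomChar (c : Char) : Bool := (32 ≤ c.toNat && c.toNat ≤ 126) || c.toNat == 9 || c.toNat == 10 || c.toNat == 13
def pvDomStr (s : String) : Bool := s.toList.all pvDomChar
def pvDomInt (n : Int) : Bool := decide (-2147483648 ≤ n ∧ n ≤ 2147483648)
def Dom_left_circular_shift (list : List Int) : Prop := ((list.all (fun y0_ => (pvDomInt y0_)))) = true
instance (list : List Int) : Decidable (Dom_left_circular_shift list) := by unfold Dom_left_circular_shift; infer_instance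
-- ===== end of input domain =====

-- B replaces A's in-place backward mutation loop and post-loop wrap fixup with one
-- forward indexed comprehension pulling the successor's leading digit (objective: simpler).
-- ===== PORT A =====
-- int(str(number)[0])   (totalised with defaults; defaults never fire under Pre_)
def a_get_leftest (x : Int) : Int :=
  (PySem.Int.ofChars? [PySem.List.pyGetD (PySem.Int.toChars x) 0 ' ']).getD 0

-- str(number)[1:]
def a_delete (x : Int) : List Char :=
  PySem.List.slice (PySem.Int.toChars x) (some 1) none

-- str() of a shifted_list entry, which in A is either an int or a string
def a_strOf : Int ⊕ List Char → List Char
  | Sum.inl n => PySem.Int.toChars n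
  | Sum.inr s => s

-- int(str(number) + str(digit))
def a_concat (v : Int ⊕ List Char) (d : Int) : Int :=
  (PySem.Int.ofChars? (a_strOf v ++ PySem.Int.toChars d)).getD 0

-- one iteration of A's loop; state = (shifted_list, leftest_of_first_element)
def a_step (l : List Int) (st : List (Int ⊕ List Char) × Int) (i : Int) :
    List (Int ⊕ List Char) × Int :=
  let x := PySem.List.pyGetD l i 0
  let ld := a_get_leftest x
  if i == 0 then
    (st.1 ++ [Sum.inr (a_delete x)], ld)
  else
    let sh := PySem.List.pySetD st.1 (i - 1)
      (Sum.inl (a_concat (PySem.List.pyGetD st.1 (i - 1) (Sum.inl 0)) ld))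
    (sh ++ [Sum.inr (a_delete x)], st.2)

-- after the loop: shifted_list[-1] = concatenate(shifted_list[-1], leftest_of_first_element),
-- then return the list (all entries are ints under Pre_)
def a_finish (st : List (Int ⊕ List Char) × Int) : List Int :=
  (PySem.List.pySetD st.1 (-1)
    (Sum.inl (a_concat (PySem.List.pyGetD st.1 (-1) (Sum.inl 0)) st.2))).map
    (fun v => match v with | Sum.inl n => n | Sum.inr _ => 0)

def left_circular_shift (list : List Int) : List Int :=
  a_finish ((PySem.List.pyRange 0 (PySem.List.len list) 1).foldl (a_step list) ([], 0))

-- ===== PORT B =====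
-- int(str(list[i])[1:] + str(int(str(list[(i+1) % n])[0])))
def b_shift (cur nxt : Int) : Int :=
  (PySem.Int.ofChars? (PySem.List.slice (PySem.Int.toChars cur) (some 1) none
    ++ PySem.Int.toChars
        ((PySem.Int.ofChars? [PySem.List.pyGetD (PySem.Int.toChars nxt) 0 ' ']).getD 0))).getD 0

def left_circular_shift_alt (list : List Int) : List Int :=
  (PySem.List.pyRange 0 (PySem.List.len list) 1).map (fun i =>
    b_shift (PySem.List.pyGetD list i 0)
            (PySem.List.pyGetD list (PySem.Int.mod (i + 1) (PySem.List.len list)) 0))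

-- ===== PRECONDITION & SPEC =====
-- Pre_ excludes the empty list (A raises IndexError at shifted_list[-1]) and lists
-- containing a negative element (A raises ValueError at int(str(number)[0]) = int('-')).
def Pre_left_circular_shift (list : List Int) : Prop :=
  list ≠ [] ∧ ∀ x ∈ list, 0 ≤ x
instance (list : List Int) : Decidable (Pre_left_circular_shift list) := by
  unfold Pre_left_circular_shift; infer_instance
def pvWitness_left_circular_shift : List Int := [12, 345, 6]

def Spec_left_circular_shift (list : List Int) (out : List Int) : Prop :=
  out = left_circular_shift_alt list
instance (list : List Int) (out : List Int) : Decidable (Spec_left_circular_shift list out) := by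
  unfold Spec_left_circular_shift; infer_instance

-- ===== CLAIM (what is proved, stated in full; the proofs are below) =====
def Claim_equal_left_circular_shift : Prop :=
  ∀ (list : List Int), Dom_left_circular_shift list → Pre_left_circular_shift list →
    Spec_left_circular_shift list (left_circular_shift list)

-- ===== LEMMAS AND PROOFS =====

-- the per-index value both programs compute, as A's helpers compose it
theorem a_concat_delete (x y : Int) :
    a_concat (Sum.inr (a_delete x)) (a_get_leftest y) = b_shift x y := rfl

-- shape of A's shifted_list after processing indices 0..k
def aShape (l : List Int) (k : Nat) : List (Int ⊕ List Char) :=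
  (List.range k).map (fun j => (Sum.inl (b_shift (l.getD j 0) (l.getD (j + 1) 0)) : Int ⊕ List Char))
    ++ [Sum.inr (a_delete (l.getD k 0))]

theorem a_loop_inv (l : List Int) (k : Nat) (hk : k < l.length) :
    ((List.range (k + 1)).foldl (fun st (j : Nat) => a_step l st (j : Int)) ([], 0))
      = (aShape l k, a_get_leftest (l.getD 0 0)) := by
  induction k with
  | zero =>
      simp [List.range_succ, a_step, aShape]
  | succ k ih =>
      have hk' : k < l.length := by omega
      rw [List.range_succ, List.foldl_append, ih hk']
      have hne : ((((k : Int) + 1) == 0) = false) := by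
        simp; omega
      have hcast : ((k + 1 : Nat) : Int) = (k : Int) + 1 := by push_cast; ring
      simp only [List.foldl_cons, List.foldl_nil, a_step, hcast, hne]
      have hsub : (k : Int) + 1 - 1 = ((k : Nat) : Int) := by ring
      have hlen : ((List.range k).map
          (fun j => (Sum.inl (b_shift (l.getD j 0) (l.getD (j + 1) 0)) : Int ⊕ List Char))).length = k := by
        simp
      have hget : PySem.List.pyGetD (aShape l k) ((k : Int) + 1 - 1) (Sum.inl 0)
          = Sum.inr (a_delete (l.getD k 0)) := by
        rw [hsub, PySem.List.pyGetD_natCast]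
        unfold aShape
        rw [List.getD_eq_getElem?_getD, List.getElem?_append_right (by omega)]
        simp
      have hset : PySem.List.pySetD (aShape l k) ((k : Int) + 1 - 1)
          (Sum.inl (a_concat (Sum.inr (a_delete (l.getD k 0)))
            (a_get_leftest (PySem.List.pyGetD l ((k : Int) + 1) 0))))
          = (List.range (k + 1)).map
              (fun j => (Sum.inl (b_shift (l.getD j 0) (l.getD (j + 1) 0)) : Int ⊕ List Char)) := by
        rw [hsub, PySem.List.pySetD_natCast]
        unfold aShape
        rw [List.set_append_right _ _ (by omega)]
        simp only [hlen]
        rw [List.range_succ, List.map_append]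
        have : PySem.List.pyGetD l ((k : Int) + 1) 0 = l.getD (k + 1) 0 := by
          rw [← hcast, PySem.List.pyGetD_natCast]
        simp [this, a_concat_delete]
      rw [hget, hset]
      unfold aShape
      have : PySem.List.pyGetD l ((k : Int) + 1) 0 = l.getD (k + 1) 0 := by
        rw [← hcast, PySem.List.pyGetD_natCast]
      simp [this]

theorem pySetD_append_singleton_neg_one {α : Type} (xs : List α) (x v : α) :
    PySem.List.pySetD (xs ++ [x]) (-1) v = xs ++ [v] := by
  simp [PySem.List.pySetD, PySem.List.pySet?, PySem.List.pyIdx?]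

-- ===== VERDICT =====
set_option maxHeartbeats 1000000 in
theorem left_circular_shift_spec : Claim_equal_left_circular_shift := by
  intro l _hdom hpre
  obtain ⟨hne, _hnn⟩ := hpre
  unfold Spec_left_circular_shift
  obtain ⟨m, hm⟩ : ∃ m, l.length = m + 1 := by
    cases l with
    | nil => exact absurd rfl hne
    | cons a t => exact ⟨t.length, rfl⟩
  -- evaluate A
  unfold left_circular_shift left_circular_shift_alt a_finish
  have hlen : PySem.List.len l = ((m + 1 : Nat) : Int) := by
    simp [PySem.List.len_eq, hm]
  rw [hlen, PySem.List.pyRange_zero_nat, List.foldl_map, List.map_map]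
  rw [a_loop_inv l m (by omega)]
  unfold aShape
  rw [PySem.List.pyGetD_neg_one_append_singleton, pySetD_append_singleton_neg_one,
    a_concat_delete]
  rw [List.map_append, List.map_map]
  -- evaluate B
  rw [List.range_succ, List.map_append]
  congr 1
  · apply List.map_congr_left
    intro j hj
    have hj' : j < m := List.mem_range.mp hj
    have hmod : PySem.Int.mod ((j : Int) + 1) ((m + 1 : Nat) : Int) = ((j + 1 : Nat) : Int) := by
      rw [PySem.Int.mod_eq_emod_of_pos (by push_cast; omega)]
      rw [Int.emod_eq_of_lt (by omega) (by push_cast; omega)]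
      push_cast; ring
    simp only [Function.comp, PySem.List.pyGetD_natCast, hmod]
  · have hmod : PySem.Int.mod ((m : Int) + 1) ((m + 1 : Nat) : Int) = 0 := by
      rw [PySem.Int.mod_eq_emod_of_pos (by push_cast; omega)]
      push_cast
      exact Int.emod_self
    simp [PySem.List.pyGetD_zero]
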